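-- pv_equiv track=rewrite | github.com/SteveWillowby/Link_Prediction_Limits | link_pred_class_info.py | __new_color_partitioning__
-- ===== SOURCE A (Python) =====
-- def __new_color_partitioning__(new_node_to_old, node_colors):
--     # Get a partitioning corresponding to the new colors.
--     num_nodes = len(new_node_to_old)
--     new_colors = [node_colors[new_node_to_old[i]] for i in range(0, num_nodes)]
--     new_colors = sorted(list(set(new_colors)))
--     ncs = {new_colors[i]: i for i in range(0, len(new_colors))}
--     new_colors = [[] for _ in range(0, len(new_colors))]
--     for i in range(0, num_nodes):
--         new_colors[ncs[node_colors[new_node_to_old[i]]]].append(i)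
--     del ncs
--     return new_colors
-- ===== SOURCE B (Python) =====
-- def __new_color_partitioning__(new_node_to_old, node_colors):
--     # Per-color scans: for each distinct color in sorted order, one filter pass over
--     # all positions collects its node indices. No index table, no scatter pass.
--     colors = [node_colors[v] for v in new_node_to_old]
--     return [[i for i in range(len(colors)) if colors[i] == c]
--             for c in sorted(set(colors))]
-- ===== Notes on version B (the rewrite author's own statement) =====
-- stated objective: simpler
-- what changed: Eliminates A's color->slot index table and its preallocate-and-scatter pass entirely: B maps positions to colors and, for each sorted distinct color, runs an independent filter pass collecting that color's positions (k per-color scans instead of one dict-driven scatter).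
import Mathlib
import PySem

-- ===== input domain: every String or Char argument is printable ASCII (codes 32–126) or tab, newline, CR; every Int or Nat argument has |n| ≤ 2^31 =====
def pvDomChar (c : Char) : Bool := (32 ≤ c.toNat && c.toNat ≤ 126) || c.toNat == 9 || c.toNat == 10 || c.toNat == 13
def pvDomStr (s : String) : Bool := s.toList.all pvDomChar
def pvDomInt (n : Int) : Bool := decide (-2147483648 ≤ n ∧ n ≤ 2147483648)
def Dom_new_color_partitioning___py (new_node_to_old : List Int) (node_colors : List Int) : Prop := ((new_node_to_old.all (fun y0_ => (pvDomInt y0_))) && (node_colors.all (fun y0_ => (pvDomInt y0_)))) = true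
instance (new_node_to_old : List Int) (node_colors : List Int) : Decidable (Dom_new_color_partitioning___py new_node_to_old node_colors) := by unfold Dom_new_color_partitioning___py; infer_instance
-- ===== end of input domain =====

-- B drops A's color->slot index table and its preallocate-and-scatter pass: it maps
-- positions to colors once and collects each sorted distinct color's positions by an
-- independent filter pass (objective: simpler).

-- ===== PORT A =====
def new_color_partitioning___py (new_node_to_old : List Int) (node_colors : List Int) : List (List Int) :=
  -- num_nodes = len(new_node_to_old); new_colors = [node_colors[new_node_to_old[i]] for i in range(0, num_nodes)]
  let colors : List Int := (PySem.List.pyRange 0 (new_node_to_old.length : Int) 1).map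
      (fun i => PySem.List.pyGetD node_colors (PySem.List.pyGetD new_node_to_old i 0) 0)
  -- new_colors = sorted(list(set(new_colors)))  (sorted without key: result independent of set order)
  let sc : List Int := PySem.List.sorted (PySem.Set.ofList colors) (fun x => x) false
  -- ncs = {new_colors[i]: i for i in range(0, len(new_colors))}
  let ncs : PySem.Dict Int Int := (PySem.List.pyRange 0 (sc.length : Int) 1).foldl
      (fun d i => d.insert (PySem.List.pyGetD sc i 0) i) PySem.Dict.empty
  -- new_colors = [[] for _ in range(0, len(new_colors))]
  let init : List (List Int) := (PySem.List.pyRange 0 (sc.length : Int) 1).map (fun _ => ([] : List Int))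
  -- for i in range(0, num_nodes): new_colors[ncs[node_colors[new_node_to_old[i]]]].append(i)
  (PySem.List.pyRange 0 (new_node_to_old.length : Int) 1).foldl
    (fun acc i =>
      let j := ncs.getD (PySem.List.pyGetD node_colors (PySem.List.pyGetD new_node_to_old i 0) 0) 0
      PySem.List.pySetD acc j (PySem.List.pyGetD acc j [] ++ [i])) init

-- ===== PORT B =====
def new_color_partitioning___py_alt (new_node_to_old : List Int) (node_colors : List Int) : List (List Int) :=
  -- colors = [node_colors[v] for v in new_node_to_old]
  let colors : List Int := new_node_to_old.map (fun v => PySem.List.pyGetD node_colors v 0)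
  -- return [[i for i in range(len(colors)) if colors[i] == c] for c in sorted(set(colors))]
  (PySem.List.sorted (PySem.Set.ofList colors) (fun x => x) false).map
    (fun c => (PySem.List.pyRange 0 (colors.length : Int) 1).filter
        (fun i => PySem.List.pyGetD colors i 0 == c))

-- ===== PRECONDITION & SPEC =====
-- Pre_ excludes exactly the inputs where Python A raises IndexError: some entry of
-- new_node_to_old is not a valid (possibly negative) Python index into node_colors.
def Pre_new_color_partitioning___py (new_node_to_old : List Int) (node_colors : List Int) : Prop :=
  ∀ v ∈ new_node_to_old, PySem.Raise.InRange node_colors.length v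
instance (new_node_to_old : List Int) (node_colors : List Int) : Decidable (Pre_new_color_partitioning___py new_node_to_old node_colors) := by unfold Pre_new_color_partitioning___py; infer_instance
def pvWitness_new_color_partitioning___py : List Int × List Int := ([0, 2, 1, -1], [5, 3, 5])

def Spec_new_color_partitioning___py (new_node_to_old : List Int) (node_colors : List Int) (out : List (List Int)) : Prop := out = new_color_partitioning___py_alt new_node_to_old node_colors
instance (new_node_to_old : List Int) (node_colors : List Int) (out : List (List Int)) : Decidable (Spec_new_color_partitioning___py new_node_to_old node_colors out) := by unfold Spec_new_color_partitioning___py; infer_instance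

-- ===== CLAIM (what is proved, stated in full; the proofs are below) =====
def Claim_equal_new_color_partitioning___py : Prop := ∀ (new_node_to_old : List Int) (node_colors : List Int), Dom_new_color_partitioning___py new_node_to_old node_colors → Pre_new_color_partitioning___py new_node_to_old node_colors → Spec_new_color_partitioning___py new_node_to_old node_colors (new_color_partitioning___py new_node_to_old node_colors)

-- ===== LEMMAS AND PROOFS =====

-- Length is preserved through A's scatter loop.
lemma pvScatterLength (idx : Int → Int) (l : List Int) :
    ∀ (acc : List (List Int)),
    (l.foldl (fun a i => PySem.List.pySetD a (idx i) (PySem.List.pyGetD a (idx i) [] ++ [i])) acc).length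
      = acc.length := by
  induction l with
  | nil => intro acc; rfl
  | cons x t ih =>
      intro acc
      simp only [List.foldl_cons, ih, PySem.List.length_pySetD]

-- A's scatter loop, slot by slot: slot j collects (in order) the i with idx i = j.
lemma pvScatterGetElem? (idx : Int → Int) :
    ∀ (l : List Int) (acc : List (List Int)),
    (∀ i ∈ l, 0 ≤ idx i ∧ idx i < (acc.length : Int)) →
    ∀ j : Nat, j < acc.length →
    (l.foldl (fun a i => PySem.List.pySetD a (idx i) (PySem.List.pyGetD a (idx i) [] ++ [i])) acc)[j]?
      = some ((acc[j]?.getD []) ++ l.filter (fun i => idx i == (j : Int))) := by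
  intro l
  induction l with
  | nil =>
      intro acc _ j hj
      simp [List.getElem?_eq_getElem hj]
  | cons x t ih =>
      intro acc hb j hj
      obtain ⟨hx0, hx1⟩ := hb x (by simp)
      have hxN : (idx x).toNat < acc.length := by omega
      have hacc' : (PySem.List.pySetD acc (idx x) (PySem.List.pyGetD acc (idx x) [] ++ [x]))
          = acc.set (idx x).toNat (acc[(idx x).toNat] ++ [x]) := by
        rw [PySem.List.pySetD_of_nonneg _ _ hx0, PySem.List.pyGetD_eq_getElem _ _ hx0 hx1]
      rw [List.foldl_cons, hacc', ih _ (by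
        intro i hi
        have := hb i (by simp [hi])
        simpa [List.length_set] using this) j (by simpa [List.length_set] using hj)]
      have hget : ((acc.set (idx x).toNat (acc[(idx x).toNat] ++ [x]))[j]?).getD []
          = if (idx x).toNat = j then acc[j] ++ [x] else acc[j] := by
        rw [List.getElem?_eq_getElem (by simpa [List.length_set] using hj)]
        simp only [List.getElem_set, Option.getD_some]
        split_ifs with h
        · subst h; rfl
        · rfl
      rw [hget]
      by_cases h : (idx x).toNat = j
      · have hEq : idx x = (j : Int) := by omega
        simp [hEq, List.getElem?_eq_getElem hj]
      · have hNe : ¬ (idx x = (j : Int)) := by omega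
        simp [hNe, h, List.getElem?_eq_getElem hj]

-- A's index table: ncs.getD sc[k] 0 = k, for sc without duplicates.
lemma pvNcsGetD (sc : List Int) (hnd : sc.Nodup) (k : Nat) (hk : k < sc.length) :
    ((PySem.List.pyRange 0 (sc.length : Int) 1).foldl
        (fun d i => d.insert (PySem.List.pyGetD sc i 0) i) PySem.Dict.empty).getD sc[k] 0
      = (k : Int) := by
  set ncs := (PySem.List.pyRange 0 (sc.length : Int) 1).foldl
      (fun d i => d.insert (PySem.List.pyGetD sc i 0) i) PySem.Dict.empty with hncs
  have hfold : ncs = ((PySem.List.pyRange 0 (sc.length : Int) 1).map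
      (fun i => ((i, PySem.List.pyGetD sc i 0) : Int × Int))).foldl
      (fun d p => d.insert p.2 p.1) PySem.Dict.empty := by
    rw [List.foldl_map]
  have hmapNodup : (((PySem.List.pyRange 0 (sc.length : Int) 1).map
      (fun i => ((i, PySem.List.pyGetD sc i 0) : Int × Int))).map (fun p => p.2)).Nodup := by
    rw [List.map_map]
    have hcomp : ((fun (p : Int × Int) => p.2) ∘ fun i => ((i, PySem.List.pyGetD sc i 0) : Int × Int))
        = fun i => PySem.List.pyGetD sc i 0 := rfl
    rw [hcomp, PySem.List.map_pyGetD_pyRange_zero' sc 0]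
    exact hnd
  have hitems : ncs.items = [] ++ ((PySem.List.pyRange 0 (sc.length : Int) 1).map
      (fun i => ((i, PySem.List.pyGetD sc i 0) : Int × Int))).map (fun p => (p.2, p.1)) := by
    rw [hfold]
    exact PySem.Dict.items_foldl_insert_fresh _ _ _ _ (fun a _ => rfl) hmapNodup
  have hkeys : ncs.keys = sc := by
    show ncs.items.map (fun p => p.1) = sc
    rw [hitems]
    simp only [List.nil_append, List.map_map]
    exact PySem.List.map_pyGetD_pyRange_zero' sc 0
  have hmem : (sc[k], (k : Int)) ∈ ncs.items := by
    rw [hitems]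
    simp only [List.nil_append, List.map_map]
    have h1 : (((PySem.List.pyRange 0 (sc.length : Int) 1).map
        (fun i => ((PySem.List.pyGetD sc i 0, i) : Int × Int))))[k]?
        = some (PySem.List.pyGetD sc (k : Int) 0, (k : Int)) :=
      PySem.List.getElem?_map_pyRange_zero _ sc.length k hk
    have h2 : PySem.List.pyGetD sc (k : Int) 0 = sc[k] :=
      PySem.List.pyGetD_eq_getElem sc 0 (by positivity) (by exact_mod_cast hk)
    have := List.mem_of_getElem? h1
    rw [h2] at this
    simpa [Function.comp] using this
  exact PySem.Dict.getD_of_mem_items ncs hmem (hkeys ▸ hnd) 0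

-- A's whole pipeline over an index list R and a color map equals the per-color view:
-- for each sorted distinct color c, the members of R mapping to c, in order.
lemma pvA_eq_target (R : List Int) (color : Int → Int) :
    (let colors : List Int := R.map color
     let sc : List Int := PySem.List.sorted (PySem.Set.ofList colors) (fun x => x) false
     let ncs : PySem.Dict Int Int := (PySem.List.pyRange 0 (sc.length : Int) 1).foldl
        (fun d i => d.insert (PySem.List.pyGetD sc i 0) i) PySem.Dict.empty
     let init : List (List Int) := (PySem.List.pyRange 0 (sc.length : Int) 1).map (fun _ => ([] : List Int))
     R.foldl (fun acc i =>
        PySem.List.pySetD acc (ncs.getD (color i) 0)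
          (PySem.List.pyGetD acc (ncs.getD (color i) 0) [] ++ [i])) init)
    = (PySem.List.sorted (PySem.Set.ofList (R.map color)) (fun x => x) false).map
        (fun c => R.filter (fun i => color i == c)) := by
  dsimp only
  set colors : List Int := R.map color with hcolors
  set sc : List Int := PySem.List.sorted (PySem.Set.ofList colors) (fun x => x) false with hsc
  set ncs : PySem.Dict Int Int := (PySem.List.pyRange 0 (sc.length : Int) 1).foldl
      (fun d i => d.insert (PySem.List.pyGetD sc i 0) i) PySem.Dict.empty with hncs
  have hnd : sc.Nodup := (PySem.List.sorted_ofList_pairwise_lt colors).imp (fun h => ne_of_lt h)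
  have hmemsc : ∀ i ∈ R, color i ∈ sc := by
    intro i hi
    rw [hsc, PySem.List.mem_sorted, PySem.Set.mem_ofList]
    exact List.mem_map_of_mem hi
  have hidx : ∀ i ∈ R, ∃ k : Nat, ∃ hk : k < sc.length,
      sc[k] = color i ∧ ncs.getD (color i) 0 = (k : Int) := by
    intro i hi
    obtain ⟨k, hk, hke⟩ := List.mem_iff_getElem.mp (hmemsc i hi)
    exact ⟨k, hk, hke, by rw [← hke, hncs]; exact pvNcsGetD sc hnd k hk⟩
  have hinit_len : ((PySem.List.pyRange 0 (sc.length : Int) 1).map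
      (fun _ => ([] : List Int))).length = sc.length := by
    rw [PySem.List.pyRange_zero_natCast, List.map_map, List.length_map, List.length_range]
  have hbounds : ∀ i ∈ R, 0 ≤ ncs.getD (color i) 0 ∧ ncs.getD (color i) 0
      < ((((PySem.List.pyRange 0 (sc.length : Int) 1).map (fun _ => ([] : List Int))).length : Nat) : Int) := by
    intro i hi
    obtain ⟨k, hk, _, he⟩ := hidx i hi
    rw [he, hinit_len]
    constructor
    · positivity
    · exact_mod_cast hk
  have hALen : (R.foldl (fun acc i =>
      PySem.List.pySetD acc (ncs.getD (color i) 0)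
        (PySem.List.pyGetD acc (ncs.getD (color i) 0) [] ++ [i]))
      ((PySem.List.pyRange 0 (sc.length : Int) 1).map (fun _ => ([] : List Int)))).length
      = sc.length := by
    rw [pvScatterLength (fun i => ncs.getD (color i) 0) R, hinit_len]
  apply List.ext_getElem?
  intro j
  by_cases hj : j < sc.length
  · rw [pvScatterGetElem? (fun i => ncs.getD (color i) 0) R _ hbounds j (by rw [hinit_len]; exact hj)]
    have hinitj : (((PySem.List.pyRange 0 (sc.length : Int) 1).map
        (fun _ => ([] : List Int)))[j]?).getD [] = ([] : List Int) := by
      rw [PySem.List.getElem?_map_pyRange_zero (fun _ => ([] : List Int)) sc.length j hj]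
      rfl
    rw [hinitj, List.nil_append, List.getElem?_map, List.getElem?_eq_getElem hj, Option.map_some]
    congr 1
    apply List.filter_congr
    intro i hi
    obtain ⟨k, hk, hke, he⟩ := hidx i hi
    rw [Bool.eq_iff_iff]
    simp only [beq_iff_eq, he]
    constructor
    · intro h
      have hkj : k = j := by exact_mod_cast h
      subst hkj
      exact hke.symm
    · intro h
      have : sc[k] = sc[j] := by rw [hke, h]
      have := (hnd.getElem_inj_iff).mp this
      exact_mod_cast this
  · rw [List.getElem?_eq_none (by rw [hALen]; omega),
      List.getElem?_eq_none (by rw [List.length_map]; omega)]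

-- ===== VERDICT (by name: the statement is the Claim_ definition above) =====
theorem new_color_partitioning___py_spec : Claim_equal_new_color_partitioning___py := by
  intro nn nc _ _
  show new_color_partitioning___py nn nc = new_color_partitioning___py_alt nn nc
  have hA := pvA_eq_target (PySem.List.pyRange 0 (nn.length : Int) 1)
    (fun i => PySem.List.pyGetD nc (PySem.List.pyGetD nn i 0) 0)
  -- A's colors list (indexed through range) is B's direct map over the nodes.
  have hcol : (PySem.List.pyRange 0 (nn.length : Int) 1).map
      (fun i => PySem.List.pyGetD nc (PySem.List.pyGetD nn i 0) 0)
      = nn.map (fun v => PySem.List.pyGetD nc v 0) := by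
    have h1 : (PySem.List.pyRange 0 (nn.length : Int) 1).map (fun i => PySem.List.pyGetD nn i 0) = nn :=
      PySem.List.map_pyGetD_pyRange_zero' nn 0
    have h2 := congrArg (List.map (fun v => PySem.List.pyGetD nc v 0)) h1
    rw [List.map_map] at h2
    simpa [Function.comp] using h2
  rw [new_color_partitioning___py, new_color_partitioning___py_alt]
  dsimp only
  rw [hA, hcol]
  -- B's inner comprehension: the filter over range with indexed lookup is the filter by color.
  apply List.map_congr_left
  intro c _
  rw [List.length_map]
  apply List.filter_congr
  intro i hi
  obtain ⟨hi0, hi1⟩ := PySem.List.mem_pyRange_one.mp hi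
  congr 1
  rw [← hcol]
  exact Eq.symm <| PySem.List.pyGetD_map_pyRange_of_nonneg
    (fun i => PySem.List.pyGetD nc (PySem.List.pyGetD nn i 0) 0) _ i 0 hi0 hi1
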